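-- pv_equiv track=rewrite | github.com/seu11ee/AlgorithmPractice | Programmers/level3_n-queens.py | is_attacked
-- ===== SOURCE A (Python) =====
-- def is_attacked(x, y, n, board):
--     # 대각선 검사
--     i = -min(x, y)
--     while x + i < n and y + i < n:
--         if i == 0:
--             i += 1
--             continue
--         if board[y + i][x + i] == 1:
--             return True
--         i += 1
--     i = min(y+1, n - 1 - x)
--     while x + i > -1 and y - i < n:
--         if i == 0:
--             i -= 1
--             continue
--         if board[y - i][x + i] == 1:
--             return True
--         i -= 1
--     return False
-- ===== SOURCE B (Python) =====
-- def is_attacked(x, y, n, board):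
--     # Walk outward from (x, y) in the four diagonal directions.
--     for dx, dy in ((1, 1), (-1, -1), (1, -1), (-1, 1)):
--         cx, cy = x + dx, y + dy
--         while 0 <= cx < n and 0 <= cy < n:
--             if board[cy][cx] == 1:
--                 return True
--             cx += dx
--             cy += dy
--     return False
-- ===== Notes on version B (the rewrite author's own statement) =====
-- stated objective: idiomatic
-- what changed: Replaces A's two corner-anchored full-diagonal sweeps (signed index i with a skip-the-centre continue and corner-index arithmetic) by four centre-outward directional walks with an explicit bounds check per step.
-- intended difference: When 0 <= x, 0 <= y, x+y <= n-2, the last row holds a 1 at column x+y+1 and no queen sits on either true diagonal of (x,y), A returns True because its anti-diagonal sweep starts at i=min(y+1,n-1-x) and reads board[-1][x+y+1] via negative-index wraparound (a cell off both diagonals), while B returns False, the intended answer for a diagonal-attack check. — e.g. on is_attacked(0, 0, 3, [[0, 0, 0], [0, 0, 0], [0, 1, 0]]): A returns true, B returns false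
-- outside the precondition, e.g. on is_attacked(-2, 0, 4, [[0, 0, 0], [0, 0, 0], [1, 0, 0]]): A returns True, B returns False; on is_attacked(2, 2, 3, [[1], [0]]): A returns True, B raises IndexError
import Mathlib
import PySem

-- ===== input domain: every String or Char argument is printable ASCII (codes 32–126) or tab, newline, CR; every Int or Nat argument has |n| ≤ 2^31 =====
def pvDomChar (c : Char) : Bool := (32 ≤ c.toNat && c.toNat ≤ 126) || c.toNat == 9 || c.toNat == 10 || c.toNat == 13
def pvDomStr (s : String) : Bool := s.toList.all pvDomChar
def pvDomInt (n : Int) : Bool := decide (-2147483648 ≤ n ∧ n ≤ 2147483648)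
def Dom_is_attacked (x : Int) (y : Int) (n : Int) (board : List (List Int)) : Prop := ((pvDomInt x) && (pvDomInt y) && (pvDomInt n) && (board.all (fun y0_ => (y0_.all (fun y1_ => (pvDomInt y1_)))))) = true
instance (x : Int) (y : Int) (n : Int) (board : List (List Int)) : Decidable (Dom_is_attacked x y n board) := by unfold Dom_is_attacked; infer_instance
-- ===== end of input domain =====

-- B replaces A's two corner-anchored diagonal sweeps by four centre-outward walks (idiomatic
-- decomposition, same cost); on the D_ corner below A's negative-index wraparound is not reproduced.

-- board[r][c] with Python indexing (negative r from the end); 0 default only where Python would raise,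
-- which Pre_ excludes.
def pvCell (board : List (List Int)) (r c : Int) : Int :=
  (PySem.List.pyGet? ((PySem.List.pyGet? board r).getD []) c).getD 0

-- ===== PORT A =====
-- first while loop of A (main diagonal, corner-anchored, skipping i = 0)
def aLoop1 (x y n : Int) (board : List (List Int)) (i : Int) : Bool :=
  if x + i < n ∧ y + i < n then
    if i = 0 then aLoop1 x y n board (i + 1)
    else if pvCell board (y + i) (x + i) = 1 then true
    else aLoop1 x y n board (i + 1)
  else false
termination_by (n - x - i).toNat
decreasing_by all_goals omega

-- second while loop of A (anti-diagonal, i decreasing, skipping i = 0)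
def aLoop2 (x y n : Int) (board : List (List Int)) (i : Int) : Bool :=
  if x + i > -1 ∧ y - i < n then
    if i = 0 then aLoop2 x y n board (i - 1)
    else if pvCell board (y - i) (x + i) = 1 then true
    else aLoop2 x y n board (i - 1)
  else false
termination_by (x + i + 1).toNat
decreasing_by all_goals omega

def is_attacked (x : Int) (y : Int) (n : Int) (board : List (List Int)) : Bool :=
  if aLoop1 x y n board (-(min x y)) then true
  else aLoop2 x y n board (min (y + 1) (n - 1 - x))

-- ===== PORT B =====
-- one directional walk of Source B's inner while loop (fuel only makes the recursion structural;
-- n.toNat + 1 steps always suffice)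
def bWalk (n : Int) (board : List (List Int)) (dx dy cx cy : Int) : Nat → Bool
  | 0 => false
  | fuel + 1 =>
    if 0 ≤ cx ∧ cx < n ∧ 0 ≤ cy ∧ cy < n then
      if pvCell board cy cx = 1 then true
      else bWalk n board dx dy (cx + dx) (cy + dy) fuel
    else false

def is_attacked_alt (x : Int) (y : Int) (n : Int) (board : List (List Int)) : Bool :=
  [((1 : Int), (1 : Int)), (-1, -1), (1, -1), (-1, 1)].any
    (fun d => bWalk n board d.1 d.2 (x + d.1) (y + d.2) (n.toNat + 1))

-- ===== PRECONDITION & SPEC =====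
-- Pre_ admits the natural domain (0 ≤ x,y < n on a board with at least n rows of at least n
-- columns) and every input on which both of A's sweeps are empty (A returns False without reading
-- the board). Pre_ excludes inputs outside the natural domain on which A still returns a value by
-- scanning a clipped or negatively-wrapped diagonal of a malformed board: those values are
-- accidents of A's corner-anchored index arithmetic (and on some of them B raises).
def Pre_is_attacked (x : Int) (y : Int) (n : Int) (board : List (List Int)) : Prop :=
  (0 < n ∧ 0 ≤ x ∧ x < n ∧ 0 ≤ y ∧ y < n ∧ n ≤ (board.length : Int) ∧
    ∀ row ∈ board, n ≤ (row.length : Int)) ∨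
  (¬(x + -(min x y) < n ∧ y + -(min x y) < n) ∧
   ¬(x + min (y + 1) (n - 1 - x) > -1 ∧ y - min (y + 1) (n - 1 - x) < n))
instance (x : Int) (y : Int) (n : Int) (board : List (List Int)) : Decidable (Pre_is_attacked x y n board) := by unfold Pre_is_attacked; infer_instance

def pvWitness_is_attacked : Int × Int × Int × List (List Int) := (0, 0, 1, [[0]])

-- When x+y ≤ n-2, the last row has a 1 at column x+y+1 and no queen sits on either true diagonal
-- of (x,y), A returns True (its anti-diagonal sweep starts at i = min(y+1, n-1-x) and reads
-- board[-1][x+y+1] via negative-index wraparound, a cell off both diagonals) while B returns False,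
-- the intended answer for a diagonal-attack check.
def D_is_attacked (x : Int) (y : Int) (n : Int) (board : List (List Int)) : Prop :=
  0 ≤ min x y ∧ x + y ≤ n - 2 ∧ pvCell board (-1) (x + y + 1) = 1 ∧
  ∀ r < n.toNat, ∀ c < n.toNat,
    (c - x).natAbs = (r - y).natAbs → c ≠ x → pvCell board r c ≠ 1
instance (x : Int) (y : Int) (n : Int) (board : List (List Int)) : Decidable (D_is_attacked x y n board) := by unfold D_is_attacked; infer_instance

def Spec_is_attacked (x : Int) (y : Int) (n : Int) (board : List (List Int)) (out : Bool) : Prop := ¬ D_is_attacked x y n board → out = is_attacked_alt x y n board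
instance (x : Int) (y : Int) (n : Int) (board : List (List Int)) (out : Bool) : Decidable (Spec_is_attacked x y n board out) := by unfold Spec_is_attacked; infer_instance

def pvDiffWitness_is_attacked : Int × Int × Int × List (List Int) :=
  (0, 0, 3, [[0, 0, 0], [0, 0, 0], [0, 1, 0]])
def pvDiffWitnessOut_is_attacked : Bool × Bool := (true, false)

-- ===== CLAIM (what is proved, stated in full; the proofs are below) =====
def Claim_unchanged_is_attacked : Prop := ∀ (x : Int) (y : Int) (n : Int) (board : List (List Int)), Dom_is_attacked x y n board → Pre_is_attacked x y n board → Spec_is_attacked x y n board (is_attacked x y n board)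
def Claim_changed_is_attacked : Prop := Dom_is_attacked (pvDiffWitness_is_attacked.1) (pvDiffWitness_is_attacked.2.1) (pvDiffWitness_is_attacked.2.2.1) (pvDiffWitness_is_attacked.2.2.2) ∧ Pre_is_attacked (pvDiffWitness_is_attacked.1) (pvDiffWitness_is_attacked.2.1) (pvDiffWitness_is_attacked.2.2.1) (pvDiffWitness_is_attacked.2.2.2) ∧ D_is_attacked (pvDiffWitness_is_attacked.1) (pvDiffWitness_is_attacked.2.1) (pvDiffWitness_is_attacked.2.2.1) (pvDiffWitness_is_attacked.2.2.2) ∧ is_attacked (pvDiffWitness_is_attacked.1) (pvDiffWitness_is_attacked.2.1) (pvDiffWitness_is_attacked.2.2.1) (pvDiffWitness_is_attacked.2.2.2) = pvDiffWitnessOut_is_attacked.1 ∧ is_attacked_alt (pvDiffWitness_is_attacked.1) (pvDiffWitness_is_attacked.2.1) (pvDiffWitness_is_attacked.2.2.1) (pvDiffWitness_is_attacked.2.2.2) = pvDiffWitnessOut_is_attacked.2 ∧ pvDiffWitnessOut_is_attacked.1 ≠ pvDiffWitnessOut_is_attacked.2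
def Claim_exact_is_attacked : Prop := ∀ (x : Int) (y : Int) (n : Int) (board : List (List Int)), Dom_is_attacked x y n board → Pre_is_attacked x y n board → D_is_attacked x y n board → is_attacked x y n board ≠ is_attacked_alt x y n board

-- ===== LEMMAS AND PROOFS =====

theorem aLoop1_iff (x y n : Int) (b : List (List Int)) (i : Int) :
    aLoop1 x y n b i = true ↔
      ∃ j : Int, i ≤ j ∧ x + j < n ∧ y + j < n ∧ j ≠ 0 ∧ pvCell b (y + j) (x + j) = 1 := by
  induction i using aLoop1.induct (x := x) (y := y) (n := n) (board := b) with
  | case1 hc ih =>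
    rw [aLoop1]
    rw [if_pos hc, if_pos rfl, ih]
    constructor
    · rintro ⟨j, h1, h2, h3, h4, h5⟩; exact ⟨j, by omega, h2, h3, h4, h5⟩
    · rintro ⟨j, h1, h2, h3, h4, h5⟩; exact ⟨j, by omega, h2, h3, h4, h5⟩
  | case2 i hc hz hcell =>
    rw [aLoop1]
    rw [if_pos hc, if_neg hz, if_pos hcell]
    simp only [true_iff]
    exact ⟨i, le_refl _, hc.1, hc.2, hz, hcell⟩
  | case3 i hc hz hcell ih =>
    rw [aLoop1]
    rw [if_pos hc, if_neg hz, if_neg hcell]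
    rw [ih]
    constructor
    · rintro ⟨j, h1, h2, h3, h4, h5⟩; exact ⟨j, by omega, h2, h3, h4, h5⟩
    · rintro ⟨j, h1, h2, h3, h4, h5⟩
      refine ⟨j, ?_, h2, h3, h4, h5⟩
      rcases eq_or_lt_of_le h1 with h | h
      · subst h; exact absurd h5 hcell
      · omega
  | case4 i hc =>
    rw [aLoop1]
    rw [if_neg hc]
    simp only [Bool.false_eq_true, false_iff, not_exists]
    rintro j ⟨h1, h2, h3, h4, h5⟩
    omega

theorem aLoop2_iff (x y n : Int) (b : List (List Int)) (i : Int) :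
    aLoop2 x y n b i = true ↔
      ∃ j : Int, j ≤ i ∧ x + j > -1 ∧ y - j < n ∧ j ≠ 0 ∧ pvCell b (y - j) (x + j) = 1 := by
  induction i using aLoop2.induct (x := x) (y := y) (n := n) (board := b) with
  | case1 hc ih =>
    rw [aLoop2]
    rw [if_pos hc, if_pos rfl, ih]
    constructor
    · rintro ⟨j, h1, h2, h3, h4, h5⟩; exact ⟨j, by omega, h2, h3, h4, h5⟩
    · rintro ⟨j, h1, h2, h3, h4, h5⟩; exact ⟨j, by omega, h2, h3, h4, h5⟩
  | case2 i hc hz hcell =>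
    rw [aLoop2]
    rw [if_pos hc, if_neg hz, if_pos hcell]
    simp only [true_iff]
    exact ⟨i, le_refl _, hc.1, hc.2, hz, hcell⟩
  | case3 i hc hz hcell ih =>
    rw [aLoop2]
    rw [if_pos hc, if_neg hz, if_neg hcell]
    rw [ih]
    constructor
    · rintro ⟨j, h1, h2, h3, h4, h5⟩; exact ⟨j, by omega, h2, h3, h4, h5⟩
    · rintro ⟨j, h1, h2, h3, h4, h5⟩
      refine ⟨j, ?_, h2, h3, h4, h5⟩
      rcases eq_or_lt_of_le h1 with h | h
      · exact absurd (h ▸ h5) hcell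
      · omega
  | case4 i hc =>
    rw [aLoop2]
    rw [if_neg hc]
    simp only [Bool.false_eq_true, false_iff, not_exists]
    rintro j ⟨h1, h2, h3, h4, h5⟩
    omega

theorem bWalk_pp (n : Int) (b : List (List Int)) :
    ∀ (fuel : Nat) (cx cy : Int), n ≤ cx + fuel → 0 ≤ cx → 0 ≤ cy →
      (bWalk n b 1 1 cx cy fuel = true ↔
        ∃ k : Int, 0 ≤ k ∧ cx + k < n ∧ cy + k < n ∧ pvCell b (cy + k) (cx + k) = 1) := by
  intro fuel
  induction fuel with
  | zero =>
    intro cx cy h hx hy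
    simp only [bWalk, Bool.false_eq_true, false_iff, not_exists]
    rintro k ⟨h1, h2, h3, h4⟩
    omega
  | succ f ih =>
    intro cx cy h hx hy
    rw [bWalk]
    by_cases hb : 0 ≤ cx ∧ cx < n ∧ 0 ≤ cy ∧ cy < n
    · rw [if_pos hb]
      by_cases hcell : pvCell b cy cx = 1
      · rw [if_pos hcell]
        simp only [true_iff]
        exact ⟨0, le_refl _, by omega, by omega, by simpa using hcell⟩
      · rw [if_neg hcell]
        rw [ih (cx + 1) (cy + 1) (by omega) (by omega) (by omega)]
        constructor
        · rintro ⟨k, h1, h2, h3, h4⟩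
          refine ⟨k + 1, by omega, by omega, by omega, ?_⟩
          have e1 : cy + (k + 1) = cy + 1 + k := by ring
          have e2 : cx + (k + 1) = cx + 1 + k := by ring
          rw [e1, e2]; exact h4
        · rintro ⟨k, h1, h2, h3, h4⟩
          rcases eq_or_lt_of_le h1 with hk | hk
          · exfalso; apply hcell; simpa [← hk] using h4
          · refine ⟨k - 1, by omega, by omega, by omega, ?_⟩
            have e1 : cy + 1 + (k - 1) = cy + k := by ring
            have e2 : cx + 1 + (k - 1) = cx + k := by ring
            rw [e1, e2]; exact h4
    · rw [if_neg hb]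
      simp only [Bool.false_eq_true, false_iff, not_exists]
      rintro k ⟨h1, h2, h3, h4⟩
      omega

theorem bWalk_mm (n : Int) (b : List (List Int)) :
    ∀ (fuel : Nat) (cx cy : Int), cx < fuel → cx < n → cy < n →
      (bWalk n b (-1) (-1) cx cy fuel = true ↔
        ∃ k : Int, 0 ≤ k ∧ 0 ≤ cx - k ∧ 0 ≤ cy - k ∧ pvCell b (cy - k) (cx - k) = 1) := by
  intro fuel
  induction fuel with
  | zero =>
    intro cx cy h hx hy
    simp only [bWalk, Bool.false_eq_true, false_iff, not_exists]
    rintro k ⟨h1, h2, h3, h4⟩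
    omega
  | succ f ih =>
    intro cx cy h hx hy
    rw [bWalk]
    by_cases hb : 0 ≤ cx ∧ cx < n ∧ 0 ≤ cy ∧ cy < n
    · rw [if_pos hb]
      by_cases hcell : pvCell b cy cx = 1
      · rw [if_pos hcell]
        simp only [true_iff]
        exact ⟨0, le_refl _, by omega, by omega, by simpa using hcell⟩
      · rw [if_neg hcell]
        rw [show cx + -1 = cx - 1 by ring, show cy + -1 = cy - 1 by ring]
        rw [ih (cx - 1) (cy - 1) (by omega) (by omega) (by omega)]
        constructor
        · rintro ⟨k, h1, h2, h3, h4⟩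
          refine ⟨k + 1, by omega, by omega, by omega, ?_⟩
          have e1 : cy - (k + 1) = cy - 1 - k := by ring
          have e2 : cx - (k + 1) = cx - 1 - k := by ring
          rw [e1, e2]; exact h4
        · rintro ⟨k, h1, h2, h3, h4⟩
          rcases eq_or_lt_of_le h1 with hk | hk
          · exfalso; apply hcell; simpa [← hk] using h4
          · refine ⟨k - 1, by omega, by omega, by omega, ?_⟩
            have e1 : cy - 1 - (k - 1) = cy - k := by ring
            have e2 : cx - 1 - (k - 1) = cx - k := by ring
            rw [e1, e2]; exact h4
    · rw [if_neg hb]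
      simp only [Bool.false_eq_true, false_iff, not_exists]
      rintro k ⟨h1, h2, h3, h4⟩
      omega

theorem bWalk_pm (n : Int) (b : List (List Int)) :
    ∀ (fuel : Nat) (cx cy : Int), n ≤ cx + fuel → 0 ≤ cx → cy < n →
      (bWalk n b 1 (-1) cx cy fuel = true ↔
        ∃ k : Int, 0 ≤ k ∧ cx + k < n ∧ 0 ≤ cy - k ∧ pvCell b (cy - k) (cx + k) = 1) := by
  intro fuel
  induction fuel with
  | zero =>
    intro cx cy h hx hy
    simp only [bWalk, Bool.false_eq_true, false_iff, not_exists]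
    rintro k ⟨h1, h2, h3, h4⟩
    omega
  | succ f ih =>
    intro cx cy h hx hy
    rw [bWalk]
    by_cases hb : 0 ≤ cx ∧ cx < n ∧ 0 ≤ cy ∧ cy < n
    · rw [if_pos hb]
      by_cases hcell : pvCell b cy cx = 1
      · rw [if_pos hcell]
        simp only [true_iff]
        exact ⟨0, le_refl _, by omega, by omega, by simpa using hcell⟩
      · rw [if_neg hcell]
        rw [show cy + -1 = cy - 1 by ring]
        rw [ih (cx + 1) (cy - 1) (by omega) (by omega) (by omega)]
        constructor
        · rintro ⟨k, h1, h2, h3, h4⟩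
          refine ⟨k + 1, by omega, by omega, by omega, ?_⟩
          have e1 : cy - (k + 1) = cy - 1 - k := by ring
          have e2 : cx + (k + 1) = cx + 1 + k := by ring
          rw [e1, e2]; exact h4
        · rintro ⟨k, h1, h2, h3, h4⟩
          rcases eq_or_lt_of_le h1 with hk | hk
          · exfalso; apply hcell; simpa [← hk] using h4
          · refine ⟨k - 1, by omega, by omega, by omega, ?_⟩
            have e1 : cy - 1 - (k - 1) = cy - k := by ring
            have e2 : cx + 1 + (k - 1) = cx + k := by ring
            rw [e1, e2]; exact h4
    · rw [if_neg hb]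
      simp only [Bool.false_eq_true, false_iff, not_exists]
      rintro k ⟨h1, h2, h3, h4⟩
      omega

theorem bWalk_mp (n : Int) (b : List (List Int)) :
    ∀ (fuel : Nat) (cx cy : Int), cx < fuel → cx < n → 0 ≤ cy →
      (bWalk n b (-1) 1 cx cy fuel = true ↔
        ∃ k : Int, 0 ≤ k ∧ 0 ≤ cx - k ∧ cy + k < n ∧ pvCell b (cy + k) (cx - k) = 1) := by
  intro fuel
  induction fuel with
  | zero =>
    intro cx cy h hx hy
    simp only [bWalk, Bool.false_eq_true, false_iff, not_exists]
    rintro k ⟨h1, h2, h3, h4⟩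
    omega
  | succ f ih =>
    intro cx cy h hx hy
    rw [bWalk]
    by_cases hb : 0 ≤ cx ∧ cx < n ∧ 0 ≤ cy ∧ cy < n
    · rw [if_pos hb]
      by_cases hcell : pvCell b cy cx = 1
      · rw [if_pos hcell]
        simp only [true_iff]
        exact ⟨0, le_refl _, by omega, by omega, by simpa using hcell⟩
      · rw [if_neg hcell]
        rw [show cx + -1 = cx - 1 by ring]
        rw [ih (cx - 1) (cy + 1) (by omega) (by omega) (by omega)]
        constructor
        · rintro ⟨k, h1, h2, h3, h4⟩
          refine ⟨k + 1, by omega, by omega, by omega, ?_⟩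
          have e1 : cy + (k + 1) = cy + 1 + k := by ring
          have e2 : cx - (k + 1) = cx - 1 - k := by ring
          rw [e1, e2]; exact h4
        · rintro ⟨k, h1, h2, h3, h4⟩
          rcases eq_or_lt_of_le h1 with hk | hk
          · exfalso; apply hcell; simpa [← hk] using h4
          · refine ⟨k - 1, by omega, by omega, by omega, ?_⟩
            have e1 : cy + 1 + (k - 1) = cy + k := by ring
            have e2 : cx - 1 - (k - 1) = cx - k := by ring
            rw [e1, e2]; exact h4
    · rw [if_neg hb]
      simp only [Bool.false_eq_true, false_iff, not_exists]
      rintro k ⟨h1, h2, h3, h4⟩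
      omega

theorem alt_iff (x y n : Int) (b : List (List Int))
    (hp : 0 < n ∧ 0 ≤ x ∧ x < n ∧ 0 ≤ y ∧ y < n ∧ n ≤ (b.length : Int) ∧ ∀ row ∈ b, n ≤ (row.length : Int)) :
    is_attacked_alt x y n b = true ↔
      (∃ j : Int, j ≠ 0 ∧ 0 ≤ x + j ∧ x + j < n ∧ 0 ≤ y + j ∧ y + j < n ∧ pvCell b (y + j) (x + j) = 1) ∨
      (∃ j : Int, j ≠ 0 ∧ 0 ≤ x + j ∧ x + j < n ∧ 0 ≤ y - j ∧ y - j < n ∧ pvCell b (y - j) (x + j) = 1) := by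
  obtain ⟨hn, hx0, hxn, hy0, hyn, hbl, hrl⟩ := hp
  have hnn : ((n.toNat : Int)) = n := Int.toNat_of_nonneg (by omega)
  rw [is_attacked_alt]
  simp only [List.any_cons, List.any_nil, Bool.or_false, Bool.or_eq_true]
  rw [bWalk_pp n b (n.toNat + 1) (x + 1) (y + 1) (by push_cast; omega) (by omega) (by omega)]
  rw [show x + -1 = x - 1 by ring, show y + -1 = y - 1 by ring]
  rw [bWalk_mm n b (n.toNat + 1) (x - 1) (y - 1) (by push_cast; omega) (by omega) (by omega)]
  rw [bWalk_pm n b (n.toNat + 1) (x + 1) (y - 1) (by push_cast; omega) (by omega) (by omega)]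
  rw [bWalk_mp n b (n.toNat + 1) (x - 1) (y + 1) (by push_cast; omega) (by omega) (by omega)]
  constructor
  · rintro (⟨k, h1, h2, h3, h4⟩ | ⟨k, h1, h2, h3, h4⟩ | ⟨k, h1, h2, h3, h4⟩ | ⟨k, h1, h2, h3, h4⟩)
    · refine Or.inl ⟨k + 1, by omega, by omega, by omega, by omega, by omega, ?_⟩
      rw [show y + (k + 1) = y + 1 + k by ring, show x + (k + 1) = x + 1 + k by ring]; exact h4
    · refine Or.inl ⟨-(k + 1), by omega, by omega, by omega, by omega, by omega, ?_⟩
      rw [show y + -(k + 1) = y - 1 - k by ring, show x + -(k + 1) = x - 1 - k by ring]; exact h4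
    · refine Or.inr ⟨k + 1, by omega, by omega, by omega, by omega, by omega, ?_⟩
      rw [show y - (k + 1) = y - 1 - k by ring, show x + (k + 1) = x + 1 + k by ring]; exact h4
    · refine Or.inr ⟨-(k + 1), by omega, by omega, by omega, by omega, by omega, ?_⟩
      rw [show y - -(k + 1) = y + 1 + k by ring, show x + -(k + 1) = x - 1 - k by ring]; exact h4
  · rintro (⟨j, hj, h1, h2, h3, h4, h5⟩ | ⟨j, hj, h1, h2, h3, h4, h5⟩)
    · rcases lt_or_gt_of_ne hj with hneg | hpos
      · refine Or.inr (Or.inl ⟨-j - 1, by omega, by omega, by omega, ?_⟩)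
        rw [show y - 1 - (-j - 1) = y + j by ring, show x - 1 - (-j - 1) = x + j by ring]; exact h5
      · refine Or.inl ⟨j - 1, by omega, by omega, by omega, ?_⟩
        rw [show y + 1 + (j - 1) = y + j by ring, show x + 1 + (j - 1) = x + j by ring]; exact h5
    · rcases lt_or_gt_of_ne hj with hneg | hpos
      · refine Or.inr (Or.inr (Or.inr ⟨-j - 1, by omega, by omega, by omega, ?_⟩))
        rw [show y + 1 + (-j - 1) = y - j by ring, show x - 1 - (-j - 1) = x + j by ring]; exact h5
      · refine Or.inr (Or.inr (Or.inl ⟨j - 1, by omega, by omega, by omega, ?_⟩))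
        rw [show y - 1 - (j - 1) = y - j by ring, show x + 1 + (j - 1) = x + j by ring]; exact h5

theorem a_iff (x y n : Int) (b : List (List Int))
    (hp : 0 < n ∧ 0 ≤ x ∧ x < n ∧ 0 ≤ y ∧ y < n ∧ n ≤ (b.length : Int) ∧ ∀ row ∈ b, n ≤ (row.length : Int)) :
    is_attacked x y n b = true ↔
      (∃ j : Int, j ≠ 0 ∧ 0 ≤ x + j ∧ x + j < n ∧ 0 ≤ y + j ∧ y + j < n ∧ pvCell b (y + j) (x + j) = 1) ∨
      (∃ j : Int, j ≠ 0 ∧ 0 ≤ x + j ∧ x + j < n ∧ 0 ≤ y - j ∧ y - j < n ∧ pvCell b (y - j) (x + j) = 1) ∨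
      (x + y ≤ n - 2 ∧ pvCell b (-1) (x + y + 1) = 1) := by
  obtain ⟨hn, hx0, hxn, hy0, hyn, hbl, hrl⟩ := hp
  have hsplit : is_attacked x y n b = true ↔
      aLoop1 x y n b (-(min x y)) = true ∨ aLoop2 x y n b (min (y + 1) (n - 1 - x)) = true := by
    rw [is_attacked]
    by_cases h : aLoop1 x y n b (-(min x y)) = true
    · simp [h]
    · simp [h]
  rw [hsplit, aLoop1_iff, aLoop2_iff]
  constructor
  · rintro (⟨j, h1, h2, h3, h4, h5⟩ | ⟨j, h1, h2, h3, h4, h5⟩)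
    · exact Or.inl ⟨j, h4, by omega, h2, by omega, h3, h5⟩
    · by_cases hrow : 0 ≤ y - j
      · exact Or.inr (Or.inl ⟨j, h4, by omega, by omega, hrow, h3, h5⟩)
      · have hj : j = y + 1 := by omega
        refine Or.inr (Or.inr ⟨by omega, ?_⟩)
        rw [show (-1 : Int) = y - j by omega, show x + y + 1 = x + j by omega]; exact h5
  · rintro (⟨j, hj, h1, h2, h3, h4, h5⟩ | ⟨j, hj, h1, h2, h3, h4, h5⟩ | ⟨hc, h5⟩)
    · exact Or.inl ⟨j, by omega, h2, h4, hj, h5⟩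
    · exact Or.inr ⟨j, by omega, by omega, by omega, hj, h5⟩
    · refine Or.inr ⟨y + 1, by omega, by omega, by omega, by omega, ?_⟩
      rw [show y - (y + 1) = -1 by ring, show x + (y + 1) = x + y + 1 by ring]; exact h5

theorem final_spec : ∀ (x y n : Int) (b : List (List Int)), Pre_is_attacked x y n b →
    ¬ D_is_attacked x y n b → is_attacked x y n b = is_attacked_alt x y n b := by
  intro x y n b hp0 hnd
  rcases hp0 with hp | htriv
  case inr =>
    -- both of A's sweeps are empty and all four of B's walks start out of bounds: both return false
    obtain ⟨ht1, ht2⟩ := htriv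
    have hA1 : aLoop1 x y n b (-(min x y)) = false := by
      rw [aLoop1, if_neg ht1]
    have hA2 : aLoop2 x y n b (min (y + 1) (n - 1 - x)) = false := by
      rw [aLoop2, if_neg ht2]
    have hA : is_attacked x y n b = false := by
      rw [is_attacked, hA1]; simpa using hA2
    have hB : is_attacked_alt x y n b = false := by
      rw [is_attacked_alt]
      simp only [List.any_cons, List.any_nil, Bool.or_false, Bool.or_eq_false_iff]
      refine ⟨?_, ?_, ?_, ?_⟩
      · rw [bWalk, if_neg (show ¬(0 ≤ x + 1 ∧ x + 1 < n ∧ 0 ≤ y + 1 ∧ y + 1 < n) by omega)]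
      · rw [bWalk, if_neg (show ¬(0 ≤ x + -1 ∧ x + -1 < n ∧ 0 ≤ y + -1 ∧ y + -1 < n) by omega)]
      · rw [bWalk, if_neg (show ¬(0 ≤ x + 1 ∧ x + 1 < n ∧ 0 ≤ y + -1 ∧ y + -1 < n) by omega)]
      · rw [bWalk, if_neg (show ¬(0 ≤ x + -1 ∧ x + -1 < n ∧ 0 ≤ y + 1 ∧ y + 1 < n) by omega)]
    rw [hA, hB]
  rcases Bool.eq_false_or_eq_true (is_attacked_alt x y n b) with hB | hB
  · rw [hB]
    exact (a_iff x y n b hp).mpr (((alt_iff x y n b hp).mp hB).elim Or.inl (Or.inr ∘ Or.inl))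
  · rw [hB]
    by_contra hA
    rw [Bool.not_eq_false] at hA
    rcases (a_iff x y n b hp).mp hA with hM | hAn | ⟨hc1, hc2⟩
    · exact absurd ((alt_iff x y n b hp).mpr (Or.inl hM)) (by simp [hB])
    · exact absurd ((alt_iff x y n b hp).mpr (Or.inr hAn)) (by simp [hB])
    · have hne : is_attacked_alt x y n b ≠ true := by simp [hB]
      refine hnd ⟨by omega, hc1, hc2, ?_⟩
      intro r hr c hc habs hcx hcell
      have hn0 : (0 : Int) ≤ n := le_of_lt hp.1
      have hrn : (r : Int) < n := by omega
      have hcn : (c : Int) < n := by omega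
      rcases (by omega : (c : Int) - x = (r : Int) - y ∨ (c : Int) - x = -((r : Int) - y)) with hd | hd
      · refine hne ((alt_iff x y n b hp).mpr (Or.inl
          ⟨(c : Int) - x, by omega, by omega, by omega, by omega, by omega, ?_⟩))
        rw [show y + ((c : Int) - x) = (r : Int) by omega, show x + ((c : Int) - x) = (c : Int) by omega]
        exact hcell
      · refine hne ((alt_iff x y n b hp).mpr (Or.inr
          ⟨(c : Int) - x, by omega, by omega, by omega, by omega, by omega, ?_⟩))
        rw [show y - ((c : Int) - x) = (r : Int) by omega, show x + ((c : Int) - x) = (c : Int) by omega]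
        exact hcell

theorem final_tight : ∀ (x y n : Int) (b : List (List Int)), Pre_is_attacked x y n b →
    D_is_attacked x y n b → is_attacked x y n b ≠ is_attacked_alt x y n b := by
  intro x y n b hp0 hD
  obtain ⟨hxy0, hc1, hc2, c3⟩ := hD
  have hp : 0 < n ∧ 0 ≤ x ∧ x < n ∧ 0 ≤ y ∧ y < n ∧ n ≤ (b.length : Int) ∧
      ∀ row ∈ b, n ≤ (row.length : Int) := by
    rcases hp0 with hp | htriv
    · exact hp
    · exact absurd htriv.1 (by omega)
  have hA : is_attacked x y n b = true := (a_iff x y n b hp).mpr (Or.inr (Or.inr ⟨hc1, hc2⟩))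
  intro he
  have hB : is_attacked_alt x y n b = true := he ▸ hA
  rcases (alt_iff x y n b hp).mp hB with ⟨j, hj, h1, h2, h3, h4, h5⟩ | ⟨j, hj, h1, h2, h3, h4, h5⟩
  · refine c3 (y + j).toNat (by omega) (x + j).toNat (by omega) (by omega) (by omega) ?_
    rw [show (((y + j).toNat : Int)) = y + j by omega, show (((x + j).toNat : Int)) = x + j by omega]
    exact h5
  · refine c3 (y - j).toNat (by omega) (x + j).toNat (by omega) (by omega) (by omega) ?_
    rw [show (((y - j).toNat : Int)) = y - j by omega, show (((x + j).toNat : Int)) = x + j by omega]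
    exact h5

-- ===== VERDICT (by name: the statement is the Claim_ definition above) =====
theorem is_attacked_spec : Claim_unchanged_is_attacked := by
  intro x y n b _ hp hnd
  exact final_spec x y n b hp hnd

theorem is_attacked_changed : Claim_changed_is_attacked := by
  unfold Claim_changed_is_attacked
  refine ⟨by decide, by decide, by decide, ?_, by decide, by decide⟩
  show is_attacked 0 0 3 [[0, 0, 0], [0, 0, 0], [0, 1, 0]] = true
  rw [is_attacked]
  rw [aLoop1, aLoop1, aLoop1, aLoop1]
  norm_num [pvCell, PySem.List.pyGet?, PySem.List.pyIdx?]
  rw [aLoop2]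
  norm_num [pvCell, PySem.List.pyGet?, PySem.List.pyIdx?]

theorem is_attacked_tight : Claim_exact_is_attacked := by
  intro x y n b _ hp hD
  exact final_tight x y n b hp hD
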